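-- pv_equiv track=rewrite | github.com/Sankari-K/advent-of-code-2023 | day 14/parabolic_reflector_dish.py | tilt_row
-- ===== SOURCE A (Python) =====
-- def tilt_row(line):
--     line = list(line)
--     for index, char in enumerate(line):
--         if char == "O":
--             current_index = index
--             while current_index > 0 and line[current_index - 1] == ".":
--                 current_index -= 1
--             line[current_index], line[index] = line[index], line[current_index]
--     return line
-- ===== SOURCE B (Python) =====
-- def tilt_row(line):
--     res = []
--     os = dots = 0
--     for ch in line:
--         if ch == "O":
--             os += 1
--         elif ch == ".":
--             dots += 1
--         else:
--             res.extend("O" * os)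
--             res.extend("." * dots)
--             res.append(ch)
--             os = dots = 0
--     res.extend("O" * os)
--     res.extend("." * dots)
--     return res
-- ===== Notes on version B (the rewrite author's own statement) =====
-- stated objective: alternative
-- what changed: Replaced A's per-'O' leftward while-loop with in-place swaps by a single counting pass that tallies 'O'/'.' per segment and emits 'O'*os + '.'*dots at each blocker and at the end.
import Mathlib
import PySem

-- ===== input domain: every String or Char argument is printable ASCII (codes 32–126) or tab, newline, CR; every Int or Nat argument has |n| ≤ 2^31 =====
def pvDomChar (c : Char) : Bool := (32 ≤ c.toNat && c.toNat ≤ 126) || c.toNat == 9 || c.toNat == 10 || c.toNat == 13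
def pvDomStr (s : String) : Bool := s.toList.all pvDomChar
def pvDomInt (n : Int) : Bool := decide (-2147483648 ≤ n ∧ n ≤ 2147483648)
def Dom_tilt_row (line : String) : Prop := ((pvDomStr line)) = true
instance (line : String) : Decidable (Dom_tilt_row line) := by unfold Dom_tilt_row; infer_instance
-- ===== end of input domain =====

-- B replaces A's per-'O' leftward slide with in-place swaps by a single counting pass per segment (alternative algorithm).

-- ===== PORT A =====
-- the while loop: from index k, step left while the previous cell is '.'
def slideIdx (l : List Char) : Nat → Nat
  | 0 => 0
  | k + 1 => if l.getD k ' ' = '.' then slideIdx l k else k + 1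

-- one iteration of A's for loop at index i (indices are in range, so getD is exact here)
def tiltStep (l : List Char) (i : Nat) : List Char :=
  if l.getD i ' ' = 'O' then
    let j := slideIdx l i
    (l.set j (l.getD i ' ')).set i (l.getD j ' ')
  else l

def tilt_row (line : String) : List String :=
  ((List.range line.toList.length).foldl tiltStep line.toList).map (fun c => c.toString)

-- ===== PORT B =====
-- state: (emitted prefix ending at the last blocker, #'O' seen since, #'.' seen since)
def bstep (st : List Char × Nat × Nat) (c : Char) : List Char × Nat × Nat :=
  if c = 'O' then (st.1, st.2.1 + 1, st.2.2)
  else if c = '.' then (st.1, st.2.1, st.2.2 + 1)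
  else (st.1 ++ List.replicate st.2.1 'O' ++ List.replicate st.2.2 '.' ++ [c], 0, 0)

def render (st : List Char × Nat × Nat) : List Char :=
  st.1 ++ List.replicate st.2.1 'O' ++ List.replicate st.2.2 '.'

def tilt_row_alt (line : String) : List String :=
  (render (line.toList.foldl bstep ([], 0, 0))).map (fun c => c.toString)

-- ===== PRECONDITION & SPEC =====
def Spec_tilt_row (line : String) (out : List String) : Prop := out = tilt_row_alt line
instance (line : String) (out : List String) : Decidable (Spec_tilt_row line out) := by unfold Spec_tilt_row; infer_instance

-- ===== CLAIM (what is proved, stated in full; the proofs are below) =====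
def Claim_equal_tilt_row : Prop := ∀ (line : String), Dom_tilt_row line → Spec_tilt_row line (tilt_row line)

-- ===== LEMMAS AND PROOFS =====

lemma tiltStep_def (l : List Char) (i : Nat) :
    tiltStep l i = if l.getD i ' ' = 'O' then
      (l.set (slideIdx l i) (l.getD i ' ')).set i (l.getD (slideIdx l i) ' ')
    else l := rfl

lemma getD_append_lt (l l' : List Char) (n : Nat) (d : Char) (h : n < l.length) :
    (l ++ l').getD n d = l.getD n d := by
  simp [List.getD_eq_getElem?_getD, List.getElem?_append_left h]

lemma getD_append_ge (l l' : List Char) (n : Nat) (d : Char) (h : l.length ≤ n) :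
    (l ++ l').getD n d = l'.getD (n - l.length) d := by
  simp [List.getD_eq_getElem?_getD, List.getElem?_append_right h]

-- the emitted prefix never ends in '.', so A's slide stops exactly at the free slot
def okRes (res : List Char) : Prop := ∀ x, res.getLast? = some x → x ≠ '.'

lemma slideIdx_le (l : List Char) : ∀ i, slideIdx l i ≤ i := by
  intro i
  induction i with
  | zero => simp [slideIdx]
  | succ k ih => unfold slideIdx; split_ifs <;> omega

lemma slideIdx_stop (l : List Char) (m : Nat) (h : ¬ l.getD m ' ' = '.') :
    slideIdx l (m + 1) = m + 1 := by
  unfold slideIdx; rw [if_neg h]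

lemma slideIdx_append (x : List Char) (c : Char) :
    ∀ i, i ≤ x.length → slideIdx (x ++ [c]) i = slideIdx x i := by
  intro i
  induction i with
  | zero => intro _; rfl
  | succ k ih =>
    intro h
    unfold slideIdx
    rw [getD_append_lt _ _ _ _ (by omega), ih (by omega)]

lemma length_tiltStep (l : List Char) (i : Nat) : (tiltStep l i).length = l.length := by
  rw [tiltStep_def]; split_ifs <;> simp

lemma tiltStep_append (x : List Char) (c : Char) (i : Nat) (h : i < x.length) :
    tiltStep (x ++ [c]) i = tiltStep x i ++ [c] := by
  have hj : slideIdx x i ≤ i := slideIdx_le x i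
  rw [tiltStep_def, tiltStep_def]
  rw [getD_append_lt _ _ _ _ h, slideIdx_append x c i (by omega),
    getD_append_lt _ _ _ _ (by omega)]
  split_ifs
  · rw [List.set_append_left _ _ (by omega), List.set_append_left _ _ (by simpa using h)]
  · rfl

lemma loopN_length (l : List Char) : ∀ n, ((List.range n).foldl tiltStep l).length = l.length := by
  intro n
  induction n with
  | zero => rfl
  | succ k ih => rw [List.range_succ, List.foldl_append]; simp [length_tiltStep, ih]

lemma loopN_append (l : List Char) (c : Char) :
    ∀ n, n ≤ l.length →
      (List.range n).foldl tiltStep (l ++ [c]) = (List.range n).foldl tiltStep l ++ [c] := by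
  intro n
  induction n with
  | zero => intro _; rfl
  | succ k ih =>
    intro h
    rw [List.range_succ, List.foldl_append, List.foldl_append]
    simp only [List.foldl_cons, List.foldl_nil]
    rw [ih (by omega), tiltStep_append _ _ _ (by rw [loopN_length]; omega)]

lemma slideIdx_spec : ∀ (d : Nat) (rest p : List Char), okRes p →
    slideIdx (p ++ List.replicate d '.' ++ rest) (p.length + d) = p.length := by
  intro d
  induction d with
  | zero =>
    intro rest p hp
    simp only [List.replicate_zero, List.append_nil, Nat.add_zero]
    cases hL : p.length with
    | zero =>
      have : p = [] := List.length_eq_zero_iff.mp hL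
      subst this; rfl
    | succ m =>
      have hm : m < p.length := by omega
      have h1 : (p ++ rest).getD m ' ' = p.getD m ' ' := getD_append_lt _ _ _ _ hm
      have h2 : p.getLast? = some (p.getD m ' ') := by
        rw [List.getLast?_eq_getElem?, hL]
        simp only [Nat.add_sub_cancel]
        rw [List.getD_eq_getElem?_getD]
        cases h3 : p[m]? with
        | none => rw [List.getElem?_eq_none_iff] at h3; omega
        | some y => rfl
      have hne := hp _ h2
      exact slideIdx_stop _ _ (by rw [h1]; exact hne)
  | succ e ih =>
    intro rest p hp
    have hrep : List.replicate (e + 1) '.' = List.replicate e '.' ++ ['.'] :=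
      List.replicate_succ' ..
    have hassoc : p ++ (List.replicate e '.' ++ ['.']) ++ rest
        = p ++ List.replicate e '.' ++ ('.' :: rest) := by simp
    rw [hrep, hassoc]
    have hidx : p.length + (e + 1) = (p.length + e) + 1 := by omega
    rw [hidx]
    unfold slideIdx
    rw [getD_append_ge _ _ _ _ (by simp)]
    simp only [List.length_append, List.length_replicate, Nat.sub_self, List.getD_cons_zero]
    exact ih ('.' :: rest) p hp

lemma okRes_p (res : List Char) (os : Nat) (h : okRes res) :
    okRes (res ++ List.replicate os 'O') := by
  cases os with
  | zero => simpa using h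
  | succ m =>
    intro x hx
    rw [List.replicate_succ', ← List.append_assoc] at hx
    simp at hx
    subst hx
    decide

-- the key step: processing one more char c at the end
lemma step_render (res : List Char) (os d : Nat) (hok : okRes res) (c : Char) :
    tiltStep (render (res, os, d) ++ [c]) (render (res, os, d)).length
      = render (bstep (res, os, d) c) ∧ okRes (bstep (res, os, d) c).1 := by
  by_cases hO : c = 'O'
  · subst hO
    have hp := okRes_p res os hok
    set p := res ++ List.replicate os 'O' with hpdef
    have hlen : (render (res, os, d)).length = p.length + d := by
      simp [render, hpdef]; omega
    have hshape : render (res, os, d) ++ ['O'] = p ++ List.replicate d '.' ++ ['O'] := by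
      simp [render, hpdef]
    rw [tiltStep_def, hlen, hshape]
    have hslide := slideIdx_spec d ['O'] p hp
    rw [hslide]
    have hget_n : (p ++ List.replicate d '.' ++ ['O']).getD (p.length + d) ' ' = 'O' := by
      rw [getD_append_ge _ _ _ _ (by simp)]
      simp
    rw [hget_n, if_pos rfl]
    refine ⟨?_, by simpa [bstep] using hok⟩
    cases d with
    | zero =>
      simp only [List.replicate_zero, List.append_nil, Nat.add_zero]
      have hget_j : (p ++ ['O']).getD p.length ' ' = 'O' := by
        rw [getD_append_ge _ _ _ _ (le_refl _)]
        simp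
      rw [hget_j]
      rw [List.set_append_right _ _ (le_refl _)]
      simp only [Nat.sub_self, List.set_cons_zero]
      rw [List.set_append_right _ _ (le_refl _)]
      simp only [Nat.sub_self, List.set_cons_zero]
      simp [bstep, render, hpdef, List.replicate_succ']
    | succ e =>
      have hget_j : (p ++ List.replicate (e + 1) '.' ++ ['O']).getD p.length ' ' = '.' := by
        rw [List.append_assoc, getD_append_ge _ _ _ _ (le_refl _)]
        simp [List.replicate_succ]
      rw [hget_j]
      rw [List.append_assoc, List.set_append_right _ _ (le_refl _)]
      simp only [Nat.sub_self, List.replicate_succ, List.cons_append, List.set_cons_zero]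
      rw [List.set_append_right _ _ (by omega)]
      have hi2 : p.length + (e + 1) - p.length = e + 1 := by omega
      rw [hi2]
      simp only [List.set_cons_succ]
      rw [List.set_append_right _ _ (by simp)]
      simp only [List.length_replicate, Nat.sub_self, List.set_cons_zero]
      have h1 : List.replicate e '.' ++ ['.'] = List.replicate (e + 1) '.' :=
        (List.replicate_succ' ..).symm
      rw [h1]
      simp [bstep, render, hpdef, List.replicate_succ']
  · have hget : (render (res, os, d) ++ [c]).getD (render (res, os, d)).length ' ' = c := by
      rw [getD_append_ge _ _ _ _ (le_refl _), Nat.sub_self]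
      rfl
    rw [tiltStep_def, hget, if_neg hO]
    by_cases hdot : c = '.'
    · subst hdot
      refine ⟨?_, by simpa [bstep] using hok⟩
      simp [bstep, render, List.replicate_succ' (n := d)]
    · refine ⟨?_, ?_⟩
      · simp [bstep, hO, hdot, render]
      · intro x hx
        simp only [bstep, if_neg hO, if_neg hdot] at hx
        simp at hx
        subst hx
        exact hdot

lemma main_inv (l : List Char) :
    (List.range l.length).foldl tiltStep l = render (l.foldl bstep ([], 0, 0))
    ∧ (render (l.foldl bstep ([], 0, 0))).length = l.length
    ∧ okRes (l.foldl bstep ([], 0, 0)).1 := by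
  induction l using List.reverseRecOn with
  | nil => exact ⟨rfl, rfl, by intro x hx; simp at hx⟩
  | append_singleton t c ih =>
    obtain ⟨hA, hlen, hok⟩ := ih
    have hstep := step_render (t.foldl bstep ([], 0, 0)).1 (t.foldl bstep ([], 0, 0)).2.1
      (t.foldl bstep ([], 0, 0)).2.2 hok c
    have hfold : (t ++ [c]).foldl bstep ([], 0, 0) = bstep (t.foldl bstep ([], 0, 0)) c := by
      simp
    refine ⟨?_, ?_, ?_⟩
    · rw [List.length_append, List.length_cons, List.length_nil, List.range_succ,
        List.foldl_append]
      simp only [List.foldl_cons, List.foldl_nil]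
      rw [loopN_append t c t.length (le_refl _), hA, ← hlen]
      rw [hfold]
      exact hstep.1
    · rw [hfold]
      have h1 := congrArg List.length hstep.1
      rw [length_tiltStep] at h1
      rw [← h1]
      simp [hlen]
    · rw [hfold]
      exact hstep.2

-- ===== VERDICT (by name: the statement is the Claim_ definition above) =====
theorem tilt_row_spec : Claim_equal_tilt_row := by
  intro line _
  unfold Spec_tilt_row tilt_row tilt_row_alt
  rw [(main_inv line.toList).1]
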